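-- pv_equiv track=rewrite | github.com/mathieudelehaye/SummarEaseAI | utils/langchain_agents.py | _extract_article_from_response
-- ===== SOURCE A (Python) =====
-- from typing import List, Dict, Any, Optional
--
-- def _extract_article_from_response(response: str, options: List[str]) -> str:
--     """Extract the selected article title from agent response."""
--     response_clean = response.strip().lower()
--
--     # Look for exact matches first
--     for option in options:
--         if option.lower() in response_clean:
--             return option
--
--     # Look for partial matches
--     for option in options:
--         option_words = option.lower().split()
--         if any(word in response_clean for word in option_words if len(word) > 3):
--             return option
--
--     # Fallback to first option
--     return options[0] if options else ""
-- ===== SOURCE B (Python) =====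
-- def _extract_article_from_response(response, options):
--     """Extract the selected article title from agent response (single pass)."""
--     response_clean = response.strip().lower()
--     first_exact = None
--     first_partial = None
--     for option in options:
--         ol = option.lower()
--         if first_exact is None and ol in response_clean:
--             first_exact = option
--         if first_partial is None and any(len(w) > 3 and w in response_clean for w in ol.split()):
--             first_partial = option
--     if first_exact is not None:
--         return first_exact
--     if first_partial is not None:
--         return first_partial
--     return options[0] if options else ""
-- ===== Notes on version B (the rewrite author's own statement) =====
-- stated objective: alternative
-- what changed: Replaced A's two sequential scans over options (exact matches, then partial matches) by a single loop that tracks the first exact and the first partial match simultaneously and decides afterwards.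
import Mathlib
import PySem

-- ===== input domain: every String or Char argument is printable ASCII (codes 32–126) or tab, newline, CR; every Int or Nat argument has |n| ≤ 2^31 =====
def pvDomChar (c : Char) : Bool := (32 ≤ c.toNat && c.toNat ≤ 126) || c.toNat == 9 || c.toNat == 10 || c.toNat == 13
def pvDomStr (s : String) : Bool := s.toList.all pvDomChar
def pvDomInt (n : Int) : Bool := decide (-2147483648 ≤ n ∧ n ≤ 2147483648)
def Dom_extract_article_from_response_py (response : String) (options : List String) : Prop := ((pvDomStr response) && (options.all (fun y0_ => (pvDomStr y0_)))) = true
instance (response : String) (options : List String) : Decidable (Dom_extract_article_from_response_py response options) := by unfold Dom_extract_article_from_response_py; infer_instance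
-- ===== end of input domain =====

-- B replaces A's two sequential scans over options by ONE pass that tracks the first
-- exact and the first partial match simultaneously (objective: alternative decomposition).

-- ===== PORT A =====
-- A: scan options for the first exact (substring) match; if none, scan again for the
-- first partial (word of length > 3 contained in response) match; fallback options[0] / "".
def extract_article_from_response_py (response : String) (options : List String) : String :=
  let response_clean := PySem.Str.lower (PySem.Str.strip response)
  match options.find? (fun option => PySem.Str.isIn (PySem.Str.lower option) response_clean) with
  | some option => option
  | none =>
    match options.find? (fun option =>
        ((PySem.Str.split₀ (PySem.Str.lower option)).filter
            (fun word => decide (3 < PySem.Str.len word))).any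
          (fun word => PySem.Str.isIn word response_clean)) with
    | some option => option
    | none => match options with | [] => "" | o :: _ => o

-- ===== PORT B =====
-- B: one fold over options carrying (first_exact?, first_partial?); decide afterwards.
def extract_article_from_response_py_alt (response : String) (options : List String) : String :=
  let response_clean := PySem.Str.lower (PySem.Str.strip response)
  let st := options.foldl
    (fun (acc : Option String × Option String) option =>
      ((if acc.1.isNone && PySem.Str.isIn (PySem.Str.lower option) response_clean
          then some option else acc.1),
       (if acc.2.isNone && (PySem.Str.split₀ (PySem.Str.lower option)).any
              (fun w => decide (3 < PySem.Str.len w) && PySem.Str.isIn w response_clean)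
          then some option else acc.2)))
    (none, none)
  match st.1 with
  | some o => o
  | none =>
    match st.2 with
    | some o => o
    | none => match options with | [] => "" | o :: _ => o

-- ===== PRECONDITION & SPEC =====
def Spec_extract_article_from_response_py (response : String) (options : List String) (out : String) : Prop := out = extract_article_from_response_py_alt response options
instance (response : String) (options : List String) (out : String) : Decidable (Spec_extract_article_from_response_py response options out) := by unfold Spec_extract_article_from_response_py; infer_instance

-- ===== CLAIM (what is proved, stated in full; the proofs are below) =====
def Claim_equal_extract_article_from_response_py : Prop := ∀ (response : String) (options : List String), Dom_extract_article_from_response_py response options → Spec_extract_article_from_response_py response options (extract_article_from_response_py response options)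

-- ===== LEMMAS AND PROOFS =====

-- A "capture the first hit" fold keeps a some-accumulator unchanged.
theorem foldl_first_some (l : List String) (p : String → Bool) (v : String) :
    l.foldl (fun acc x => if acc.isNone && p x then some x else acc) (some v) = some v := by
  induction l with
  | nil => rfl
  | cons h t ih => simpa using ih

-- Starting from none, the "capture the first hit" fold is find?.
theorem foldl_first_none (l : List String) (p : String → Bool) :
    l.foldl (fun acc x => if acc.isNone && p x then some x else acc) none = l.find? p := by
  induction l with
  | nil => rfl
  | cons h t ih =>
    simp only [List.foldl_cons, List.find?_cons, Option.isNone_none, Bool.true_and]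
    cases hp : p h
    · simpa using ih
    · simpa using foldl_first_some t p h

theorem extract_article_from_response_py_spec' (response : String) (options : List String) :
    extract_article_from_response_py response options
      = extract_article_from_response_py_alt response options := by
  simp only [extract_article_from_response_py, extract_article_from_response_py_alt]
  rw [PySem.List.foldl_prod_mk
    (f := fun (acc : Option String) option =>
      if acc.isNone && PySem.Str.isIn (PySem.Str.lower option)
          (PySem.Str.lower (PySem.Str.strip response)) then some option else acc)
    (g := fun (acc : Option String) option =>
      if acc.isNone && (PySem.Str.split₀ (PySem.Str.lower option)).any
          (fun w => decide (3 < PySem.Str.len w) &&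
            PySem.Str.isIn w (PySem.Str.lower (PySem.Str.strip response)))
        then some option else acc)]
  rw [foldl_first_none, foldl_first_none]
  have hp : (fun option => ((PySem.Str.split₀ (PySem.Str.lower option)).filter
        (fun word => decide (3 < PySem.Str.len word))).any
        (fun word => PySem.Str.isIn word (PySem.Str.lower (PySem.Str.strip response))))
      = (fun option => (PySem.Str.split₀ (PySem.Str.lower option)).any
        (fun w => decide (3 < PySem.Str.len w) &&
          PySem.Str.isIn w (PySem.Str.lower (PySem.Str.strip response)))) := by
    funext o; exact List.any_filter
  rw [hp]

-- ===== VERDICT (by name: the statement is the Claim_ definition above) =====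
theorem extract_article_from_response_py_spec : Claim_equal_extract_article_from_response_py := by
  intro response options _
  exact extract_article_from_response_py_spec' response options
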